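-- pv_equiv track=rewrite | github.com/upd-csg-2024/iot-home-security | scripts/c200/rtsp_authentication.py | decodeControl
-- ===== SOURCE A (Python) =====
-- def decodeControl(strContent):
--     mapRetInf = {}
--     messageStrings = strContent.split("\n")
--     for element in messageStrings:
--         a = element.find("rtsp")
--         if a >= 0:
--             mapRetInf = element[a:]
--     return mapRetInf
-- ===== SOURCE B (Python) =====
-- def decodeControl(strContent):
--     # Scan lines from the end and return at the first match, instead of
--     # scanning all lines while overwriting an accumulator.
--     for element in reversed(strContent.split("\n")):
--         a = element.find("rtsp")
--         if a >= 0: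
--             return element[a:]
--     return {}
-- ===== Notes on version B (the rewrite author's own statement) =====
-- stated objective: simpler
-- what changed: B iterates the split lines in reverse and returns the substring at the first matching line immediately (early exit), replacing A's forward scan that keeps overwriting an accumulator with the last match.
-- outside the precondition, e.g. on decodeControl('abc'): A returns {}, B returns {}
import Mathlib
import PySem

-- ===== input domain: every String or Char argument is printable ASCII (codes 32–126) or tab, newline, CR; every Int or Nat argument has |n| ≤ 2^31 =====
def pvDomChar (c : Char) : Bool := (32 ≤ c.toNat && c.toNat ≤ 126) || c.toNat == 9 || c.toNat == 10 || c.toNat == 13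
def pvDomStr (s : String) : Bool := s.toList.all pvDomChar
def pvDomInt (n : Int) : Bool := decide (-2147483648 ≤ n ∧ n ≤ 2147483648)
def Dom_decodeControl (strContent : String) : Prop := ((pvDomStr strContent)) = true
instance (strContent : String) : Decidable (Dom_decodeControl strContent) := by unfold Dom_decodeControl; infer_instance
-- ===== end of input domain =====

-- B scans the split lines in reverse with an early return instead of A's forward
-- scan that overwrites an accumulator; return-value equivalence on inputs where a
-- line contains "rtsp" (elsewhere both Pythons return the dict {}, not a string).

-- ===== PORT A =====
-- A's accumulator starts as the dict {}; under Pre_ it is always overwritten by a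
-- string before being returned, so the port starts it at "" (never returned on Pre_).
def decodeControl (strContent : String) : String :=
  let messageStrings := (PySem.Str.split? strContent "\n").getD []   -- sep ≠ "" so split? is always some
  messageStrings.foldl
    (fun mapRetInf element =>
      let a := PySem.Str.find element "rtsp"
      if 0 ≤ a then PySem.Str.slice element (some a) none else mapRetInf)
    ""

-- ===== PORT B =====
def altScan : List String → String
  | [] => ""        -- the no-match default (outside Pre_; B's Python returns {} there)
  | element :: rest =>
      let a := PySem.Str.find element "rtsp"
      if 0 ≤ a then PySem.Str.slice element (some a) none else altScan rest

def decodeControl_alt (strContent : String) : String :=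
  altScan ((PySem.Str.split? strContent "\n").getD []).reverse

-- ===== PRECONDITION & SPEC =====
-- Pre_ excludes inputs with no line containing "rtsp": there A (and B) return the
-- dict {}, which is not a value of the declared String return type.
def Pre_decodeControl (strContent : String) : Prop :=
  ∃ e ∈ (PySem.Str.split? strContent "\n").getD [], 0 ≤ PySem.Str.find e "rtsp"
instance (strContent : String) : Decidable (Pre_decodeControl strContent) := by
  unfold Pre_decodeControl; infer_instance

def pvWitness_decodeControl : String := "x\nab rtsp://cam\ny"

def Spec_decodeControl (strContent : String) (out : String) : Prop := out = decodeControl_alt strContent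
instance (strContent : String) (out : String) : Decidable (Spec_decodeControl strContent out) := by unfold Spec_decodeControl; infer_instance

-- ===== CLAIM (what is proved, stated in full; the proofs are below) =====
def Claim_equal_decodeControl : Prop := ∀ (strContent : String), Dom_decodeControl strContent → Pre_decodeControl strContent → Spec_decodeControl strContent (decodeControl strContent)

-- ===== LEMMAS AND PROOFS =====

def hasM (l : List String) : Bool := l.any (fun e => decide (0 ≤ PySem.Str.find e "rtsp"))

theorem altScan_append_singleton (l : List String) (x : String) :
    altScan (l ++ [x]) = if hasM l then altScan l else altScan [x] := by
  induction l with
  | nil => simp [hasM]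
  | cons h t ih =>
      by_cases hh : 0 ≤ PySem.Chars.find h.toList ['r', 't', 's', 'p'] <;>
        by_cases hm : ∃ e ∈ t, 0 ≤ PySem.Chars.find e.toList ['r', 't', 's', 'p'] <;>
        simp [altScan, hasM, hh, hm] at ih ⊢ <;> simp [ih]

theorem fold_eq_altScan (l : List String) (acc : String) :
    l.foldl (fun mapRetInf element =>
        let a := PySem.Str.find element "rtsp"
        if 0 ≤ a then PySem.Str.slice element (some a) none else mapRetInf) acc
      = if hasM l then altScan l.reverse else acc := by
  induction l generalizing acc with
  | nil => simp [hasM]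
  | cons h t ih =>
      simp only [List.foldl_cons, List.reverse_cons]
      rw [ih, altScan_append_singleton]
      by_cases hh : 0 ≤ PySem.Chars.find h.toList ['r', 't', 's', 'p'] <;>
        by_cases hm : ∃ e ∈ t, 0 ≤ PySem.Chars.find e.toList ['r', 't', 's', 'p'] <;>
        simp [altScan, hasM, hh, hm]

-- ===== VERDICT (by name: the statement is the Claim_ definition above) =====
theorem decodeControl_spec : Claim_equal_decodeControl := by
  intro s _ hpre
  unfold Spec_decodeControl decodeControl decodeControl_alt
  rw [fold_eq_altScan]
  have : hasM ((PySem.Str.split? s "\n").getD []) = true := by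
    obtain ⟨e, he, hf⟩ := hpre
    simp [hasM, List.any_eq_true]
    exact ⟨e, he, hf⟩
  simp [this]
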